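-- pv_equiv track=rewrite | github.com/miliar/Code_Jam_Webscraper | solutions_python/Problem_200/2081.py | toTidy
-- ===== SOURCE A (Python) =====
-- def toTidy(n):
--     for j in range(len(n)-1):
--         d = n[j+1]-n[j]
--         if d>0:
--             nn = list(n[j+1:])
--             nn[0]=nn[0]-1
--             nn[0]=nn[0] if nn[0]>=0 else 9
--             nextn = toTidy(nn)
--             return [9]*(j+1)+nextn
--     return n
-- ===== SOURCE B (Python) =====
-- def toTidy(n):
--     a = list(n)
--     k = 0
--     for i in range(len(a) - 1):
--         if a[i + 1] > a[i]:
--             v = a[i + 1] - 1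
--             a[i + 1] = v if v >= 0 else 9
--             k = i + 1
--     for j in range(k):
--         a[j] = 9
--     return a
-- ===== Notes on version B (the rewrite author's own statement) =====
-- stated objective: faster
-- what changed: Replaces A's recursion that re-slices and re-concatenates the suffix on every trigger with a single left-to-right pass over one mutable array, tracking only the length k of the prefix to fill with 9s at the end.
import Mathlib
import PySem

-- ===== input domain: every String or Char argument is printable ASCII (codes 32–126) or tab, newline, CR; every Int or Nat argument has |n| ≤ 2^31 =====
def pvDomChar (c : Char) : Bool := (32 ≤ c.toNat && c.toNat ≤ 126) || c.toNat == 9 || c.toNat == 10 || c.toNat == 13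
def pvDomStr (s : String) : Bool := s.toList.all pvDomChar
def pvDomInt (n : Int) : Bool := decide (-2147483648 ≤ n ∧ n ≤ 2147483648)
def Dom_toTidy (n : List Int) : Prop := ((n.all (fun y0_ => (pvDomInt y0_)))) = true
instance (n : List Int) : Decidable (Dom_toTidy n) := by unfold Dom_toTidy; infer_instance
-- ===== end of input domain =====

-- B replaces A's O(d^2) slice-and-recurse with one left-to-right pass over the digit
-- array plus a final prefix fill (objective: faster, asymptotic O(d)).

-- ===== PORT A =====
-- A's `for j in range(len(n)-1)` as a counted loop (c = remaining iterations); the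
-- early `return` recurses through `rec`.
def toTidyInner (rec : List Int → List Int) : Nat → List Int → Nat → List Int
  | 0, n, _ => n
  | c + 1, n, j =>
    let d := n.getD (j + 1) 0 - n.getD j 0
    if d > 0 then
      let nn := n.drop (j + 1)
      let nn0 := nn.headD 0 - 1
      let nn0' := if nn0 ≥ 0 then nn0 else 9
      let nn' := nn0' :: nn.tail
      List.replicate (j + 1) 9 ++ rec nn'
    else
      toTidyInner rec c n (j + 1)

-- fuel = list length bounds the recursion depth (each recursive call is on a list
-- at least one element shorter); the fuel-0 guard only makes the recursion
-- structural and is reached only for the empty list, where the loop body never runs.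
def toTidyF : Nat → List Int → List Int
  | 0, n => n
  | f + 1, n => toTidyInner (toTidyF f) (n.length - 1) n 0

def toTidy (n : List Int) : List Int := toTidyF n.length n

-- ===== PORT B =====
-- B's single pass: `for i in range(len(a)-1)` as a counted loop; in-place update by
-- List.set; k = length of the prefix to fill with 9 at the end.
def altGo : Nat → List Int → Nat → Nat → List Int × Nat
  | 0, a, _, k => (a, k)
  | c + 1, a, i, k =>
    if a.getD (i + 1) 0 > a.getD i 0 then
      let v := a.getD (i + 1) 0 - 1
      let v' := if v ≥ 0 then v else 9
      altGo c (a.set (i + 1) v') (i + 1) (i + 1)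
    else
      altGo c a (i + 1) k

-- the final `for j in range(k): a[j] = 9`, i.e. overwrite the first k entries with 9
def toTidy_alt (n : List Int) : List Int :=
  let r := altGo (n.length - 1) n 0 0
  List.replicate r.2 9 ++ r.1.drop r.2

-- ===== PRECONDITION & SPEC =====
def Spec_toTidy (n : List Int) (out : List Int) : Prop := out = toTidy_alt n
instance (n : List Int) (out : List Int) : Decidable (Spec_toTidy n out) := by unfold Spec_toTidy; infer_instance

-- ===== CLAIM (what is proved, stated in full; the proofs are below) =====
def Claim_equal_toTidy : Prop := ∀ (n : List Int), Dom_toTidy n → Spec_toTidy n (toTidy n)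

-- ===== LEMMAS AND PROOFS =====

theorem getD_drop (a : List Int) (k j : Nat) :
    (a.drop k).getD j 0 = a.getD (k + j) 0 := by
  simp [List.getD, List.getElem?_drop]

-- Main invariant: B's loop state (c, a, i, k) with k ≤ i corresponds to A's inner
-- loop running on the suffix a.drop k from loop index i - k with the same c
-- iterations left, the 9-prefix of length k pending, and enough fuel f inside rec.
theorem main_inv (c : Nat) : ∀ (f : Nat) (a : List Int) (i k : Nat), k ≤ i →
    c = a.length - 1 - i → a.length - k ≤ f + 1 →
    List.replicate k 9 ++ toTidyInner (toTidyF f) c (a.drop k) (i - k)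
      = List.replicate (altGo c a i k).2 9 ++ (altGo c a i k).1.drop (altGo c a i k).2 := by
  induction c with
  | zero =>
    intro f a i k hk hc hf
    rw [altGo, toTidyInner]
  | succ c ih =>
    intro f a i k hk hc hf
    rw [altGo, toTidyInner]
    rw [getD_drop, getD_drop]
    have hki : k + (i - k + 1) = i + 1 := by omega
    have hki' : k + (i - k) = i := by omega
    rw [hki, hki']
    by_cases ht : a.getD (i + 1) 0 > a.getD i 0
    · -- trigger: A drops/decrements with fresh fuel, B sets and advances
      simp only [sub_pos.mpr ht, if_pos, ht]
      rw [List.drop_drop, hki]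
      have hlen : i + 1 < a.length := by omega
      have hf1 : 1 ≤ f := by omega
      obtain ⟨f', rfl⟩ : ∃ f', f = f' + 1 := ⟨f - 1, by omega⟩
      have hhead : (a.drop (i + 1)).headD 0 = a.getD (i + 1) 0 := by
        rw [← getD_drop a (i + 1) 0]
        cases a.drop (i + 1) with
        | nil => simp [List.getD]
        | cons x xs => simp [List.getD]
      have hsetdrop : (a.set (i + 1) (if a.getD (i + 1) 0 - 1 ≥ 0 then a.getD (i + 1) 0 - 1 else 9)).drop (i + 1)
          = (if (a.drop (i + 1)).headD 0 - 1 ≥ 0 then (a.drop (i + 1)).headD 0 - 1 else 9) :: (a.drop (i + 1)).tail := by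
        rw [hhead, List.drop_set]
        simp only [lt_irrefl, if_false, Nat.sub_self]
        cases hd : a.drop (i + 1) with
        | nil =>
          exfalso
          have := congrArg List.length hd
          simp [List.length_drop] at this
          omega
        | cons x xs => simp
      have ih' := ih f' (a.set (i + 1) (if a.getD (i + 1) 0 - 1 ≥ 0 then a.getD (i + 1) 0 - 1 else 9)) (i + 1) (i + 1)
        (le_refl _) (by simp; omega) (by simp; omega)
      rw [hsetdrop] at ih'
      simp only [Nat.sub_self] at ih'
      have hunf : toTidyF (f' + 1)
            ((if (a.drop (i + 1)).headD 0 - 1 ≥ 0 then (a.drop (i + 1)).headD 0 - 1 else 9) :: (a.drop (i + 1)).tail)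
          = toTidyInner (toTidyF f')
            (((if (a.drop (i + 1)).headD 0 - 1 ≥ 0 then (a.drop (i + 1)).headD 0 - 1 else 9) :: (a.drop (i + 1)).tail).length - 1)
            ((if (a.drop (i + 1)).headD 0 - 1 ≥ 0 then (a.drop (i + 1)).headD 0 - 1 else 9) :: (a.drop (i + 1)).tail) 0 := rfl
      have hlen2 : ((if (a.drop (i + 1)).headD 0 - 1 ≥ 0 then (a.drop (i + 1)).headD 0 - 1 else 9) :: (a.drop (i + 1)).tail).length - 1 = c := by
        simp [List.length_drop]
        omega
      rw [hunf, hlen2]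
      rw [← List.append_assoc, ← List.replicate_add, hki]
      exact ih'
    · -- no trigger: both advance the pointer
      have hd : ¬ (a.getD (i + 1) 0 - a.getD i 0 > 0) := by omega
      simp only [hd, if_neg, not_false_iff, ht]
      have ih' := ih f a (i + 1) k (by omega) (by omega) (by omega)
      have : i + 1 - k = i - k + 1 := by omega
      rw [← this]
      exact ih'

-- ===== VERDICT (by name: the statement is the Claim_ definition above) =====
theorem toTidy_spec : Claim_equal_toTidy := by
  intro n _
  unfold Spec_toTidy toTidy toTidy_alt
  cases n with
  | nil => rfl
  | cons x xs =>
    have h := main_inv ((x :: xs).length - 1) ((x :: xs).length - 1) (x :: xs) 0 0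
      (le_refl _) (by omega) (by simp)
    simp only [List.replicate, List.drop, Nat.sub_zero] at h
    rw [show toTidyF (x :: xs).length (x :: xs)
        = toTidyInner (toTidyF ((x :: xs).length - 1)) ((x :: xs).length - 1) (x :: xs) 0 by rfl]
    simpa using h
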